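-- pv_equiv track=rewrite | github.com/Thomaz-Castro/Conversor_Online | defs_copy.py | parent_printC
-- ===== SOURCE A (Python) =====
-- def parent_printC(string):
--     if (("(" in string) and (")" in string)):
--         pilha = []
--         conteudo = []
--         for i, char in enumerate(string):
--             if char == '(':
--                 pilha.append(i)
--             elif char == ')':
--                 if pilha:
--                     inicio = pilha.pop()
--                     if not pilha:
--                         conteudo.append(string[inicio+1:i])
--                 else:
--                     raise ValueError("Erro de correspondência de parênteses.")
--
--         conteudo_parenteses = ", ".join(conteudo)
--         conteudo_parenteses = "(" + conteudo_parenteses + ")"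
--         conteudo_parenteses = conteudo_parenteses.lower()
--     else:
--         conteudo_parenteses = "ERRO - parênteses não encontrados"
--
--     return conteudo_parenteses
-- ===== SOURCE B (Python) =====
-- def parent_printC(string):
--     if "(" in string and ")" in string:
--         depths = []
--         d = 0
--         for ch in string:
--             d += (ch == '(') - (ch == ')')
--             depths.append(d)
--         if any(x < 0 for x in depths):
--             raise ValueError("Erro de correspondência de parênteses.")
--         starts = [i + 1 for i, (ch, x) in enumerate(zip(string, depths)) if ch == '(' and x == 1]
--         ends = [i for i, (ch, x) in enumerate(zip(string, depths)) if ch == ')' and x == 0]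
--         conteudo = ", ".join(string[a:b] for a, b in zip(starts, ends))
--         return ("(" + conteudo + ")").lower()
--     return "ERRO - parênteses não encontrados"
-- ===== Notes on version B (the rewrite author's own statement) =====
-- stated objective: alternative
-- what changed: Replaces A's single-pass stack-driven scan by staged passes: build the running-depth profile of the whole string, check it for a negative entry (the ValueError case), read the top-level segment boundaries off the profile with two comprehensions, and zip them into slices.
import Mathlib
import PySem

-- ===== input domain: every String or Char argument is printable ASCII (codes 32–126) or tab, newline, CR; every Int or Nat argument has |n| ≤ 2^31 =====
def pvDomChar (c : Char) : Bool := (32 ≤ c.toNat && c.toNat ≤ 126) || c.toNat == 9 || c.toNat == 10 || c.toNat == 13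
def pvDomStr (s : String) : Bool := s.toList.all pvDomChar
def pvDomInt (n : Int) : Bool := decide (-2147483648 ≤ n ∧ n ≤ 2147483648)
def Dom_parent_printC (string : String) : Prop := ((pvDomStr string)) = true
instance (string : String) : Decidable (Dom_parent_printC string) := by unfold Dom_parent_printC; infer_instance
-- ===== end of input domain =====

-- B replaces A's single-pass index-stack scan by staged passes: build the prefix depth profile,
-- check it for a negative entry, read the top-level segment boundaries off the profile with two
-- comprehensions, and zip them into slices (objective: alternative decomposition; same output).

-- ===== PORT A =====
-- the for-loop: state = (pilha, conteudo); `none` models the ValueError raise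
def pvLoopA (cs : List Char) (all : List Char) (i : Int) (pilha : List Int)
    (cont : List (List Char)) : Option (List (List Char)) :=
  match cs with
  | [] => some cont
  | c :: rest =>
    if c = '(' then
      pvLoopA rest all (i + 1) (pilha ++ [i]) cont
    else if c = ')' then
      match pilha.getLast? with
      | none => none
      | some inicio =>
        let p' := pilha.dropLast
        if p' = [] then
          pvLoopA rest all (i + 1) p' (cont ++ [PySem.List.slice all (some (inicio + 1)) (some i)])
        else
          pvLoopA rest all (i + 1) p' cont
    else
      pvLoopA rest all (i + 1) pilha cont

def parent_printC (string : String) : String :=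
  if '(' ∈ string.toList ∧ ')' ∈ string.toList then
    match pvLoopA string.toList string.toList 0 [] [] with
    | none => ""  -- Python raises ValueError here; outside Pre_
    | some conteudo =>
        String.ofList (PySem.Chars.lower (['('] ++ PySem.Chars.join (", ".toList) conteudo ++ [')']))
  else
    "ERRO - parênteses não encontrados"

-- ===== PORT B =====
-- pass 1: the running-depth profile (depths[i] = depth after reading string[i])
def pvDepths (cs : List Char) (d : Int) : List Int :=
  match cs with
  | [] => []
  | c :: rest =>
    let d' := d + (if c = '(' then 1 else 0) - (if c = ')' then 1 else 0)
    d' :: pvDepths rest d'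

-- the comprehension [i+1 for i,(ch,x) in enumerate(zip(string, depths)) if ch=='(' and x==1]
def pvStarts (cs : List Char) (ds : List Int) (i : Int) : List Int :=
  match cs, ds with
  | c :: rest, d :: ds' =>
      (if c = '(' ∧ d = 1 then [i + 1] else []) ++ pvStarts rest ds' (i + 1)
  | _, _ => []

-- the comprehension [i for i,(ch,x) in enumerate(zip(string, depths)) if ch==')' and x==0]
def pvEnds (cs : List Char) (ds : List Int) (i : Int) : List Int :=
  match cs, ds with
  | c :: rest, d :: ds' =>
      (if c = ')' ∧ d = 0 then [i] else []) ++ pvEnds rest ds' (i + 1)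
  | _, _ => []

def parent_printC_alt (string : String) : String :=
  let cs := string.toList
  if '(' ∈ cs ∧ ')' ∈ cs then
    let depths := pvDepths cs 0
    if depths.any (fun x => x < 0) then ""  -- Python raises ValueError here; outside Pre_
    else
      let starts := pvStarts cs depths 0
      let ends := pvEnds cs depths 0
      let conteudo := (starts.zip ends).map
        (fun p => PySem.List.slice cs (some p.1) (some p.2))
      String.ofList (PySem.Chars.lower (['('] ++ PySem.Chars.join (", ".toList) conteudo ++ [')']))
  else
    "ERRO - parênteses não encontrados"

-- ===== PRECONDITION & SPEC =====
-- Pre_ excludes exactly the strings containing both kinds of parenthesis in which some prefix has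
-- more closing than opening parentheses — on those both Pythons raise the same ValueError.
def Pre_parent_printC (string : String) : Prop :=
  ('(' ∈ string.toList ∧ ')' ∈ string.toList) →
    ∀ n ≤ string.toList.length,
      (string.toList.take n).count ')' ≤ (string.toList.take n).count '('
instance (string : String) : Decidable (Pre_parent_printC string) := by
  unfold Pre_parent_printC; infer_instance

def pvWitness_parent_printC : String := "a(B)c(D(e))f"

def Spec_parent_printC (string : String) (out : String) : Prop := out = parent_printC_alt string
instance (string : String) (out : String) : Decidable (Spec_parent_printC string out) := by
  unfold Spec_parent_printC; infer_instance

-- ===== CLAIM (what is proved, stated in full; the proofs are below) =====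
def Claim_equal_parent_printC : Prop := ∀ (string : String), Dom_parent_printC string → Pre_parent_printC string → Spec_parent_printC string (parent_printC string)

-- ===== LEMMAS AND PROOFS =====

-- proof-only intermediate: A's loop with the stack compressed to (depth, bottom start)
def pvLoopC (cs : List Char) (all : List Char) (i depth start : Int)
    (cont : List (List Char)) : Option (List (List Char)) :=
  match cs with
  | [] => some cont
  | c :: rest =>
    if c = '(' then
      pvLoopC rest all (i + 1) (depth + 1) (if depth = 0 then i + 1 else start) cont
    else if c = ')' then
      if depth = 0 then none
      else
        pvLoopC rest all (i + 1) (depth - 1) start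
          (if depth - 1 = 0 then cont ++ [PySem.List.slice all (some start) (some i)] else cont)
    else
      pvLoopC rest all (i + 1) depth start cont

-- proof-only: the top-level segments as one recursion over the string
def pvSegs (cs : List Char) (i d start : Int) : List (Int × Int) :=
  match cs with
  | [] => []
  | c :: rest =>
    if c = '(' then
      pvSegs rest (i + 1) (d + 1) (if d = 0 then i + 1 else start)
    else if c = ')' then
      if d = 1 then (start, i) :: pvSegs rest (i + 1) 0 start
      else pvSegs rest (i + 1) (d - 1) start
    else
      pvSegs rest (i + 1) d start

-- A's stack loop equals the compressed loop (invariant: |pilha| = depth, bottom = start - 1)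
theorem pvLoop_eq (cs : List Char) : ∀ (all : List Char) (i : Int) (pilha : List Int)
    (cont : List (List Char)) (depth start : Int),
    (pilha.length : Int) = depth →
    (∀ x, pilha.head? = some x → x = start - 1) →
    pvLoopA cs all i pilha cont = pvLoopC cs all i depth start cont := by
  induction cs with
  | nil => intro all i pilha cont depth start _ _; simp [pvLoopA, pvLoopC]
  | cons c rest ih =>
    intro all i pilha cont depth start hlen hhead
    by_cases hop : c = '('
    · simp only [pvLoopA, pvLoopC, hop]
      cases pilha with
      | nil =>
        apply ih
        · simpa using hlen.symm ▸ hlen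
        · simp at hlen
          intro x hx
          simp [← hlen] at hx ⊢
          omega
      | cons p ps =>
        have hd : depth ≠ 0 := by simp at hlen; omega
        rw [if_neg hd]
        apply ih
        · simp at hlen ⊢; omega
        · intro x hx
          simp at hx
          exact hhead x (by simp [hx])
    · by_cases hcl : c = ')'
      · cases pilha with
        | nil =>
          have hd0 : depth = 0 := by simpa using hlen.symm
          simp [pvLoopA, pvLoopC, hcl, hd0]
        | cons p ps =>
          have hd : depth ≠ 0 := by simp at hlen; omega
          cases ps with
          | nil =>
            have hd1 : depth = 1 := by simpa using hlen.symm
            have hp : p = start - 1 := hhead p (by simp)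
            simp only [pvLoopA, pvLoopC, hcl, hd1, List.getLast?_singleton, List.dropLast]
            norm_num
            have : p + 1 = start := by omega
            rw [this]
            apply ih <;> simp
          | cons q qs =>
            have hd1 : depth - 1 ≠ 0 := by simp at hlen; omega
            simp only [pvLoopA, pvLoopC, hcl, if_neg hd, if_neg hd1]
            have hgl : (p :: q :: qs).getLast? = some ((p :: q :: qs).getLast (by simp)) := by
              simp [List.getLast?_eq_some_getLast]
            rw [hgl]
            have hne : (p :: q :: qs).dropLast ≠ [] := by simp
            simp only [if_neg hne]
            apply ih
            · simp at hlen ⊢; omega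
            · intro x hx
              apply hhead
              rw [← hx]
              simp [List.dropLast]
      · simp only [pvLoopA, pvLoopC, if_neg hop, if_neg hcl]
        exact ih all (i + 1) pilha cont depth start hlen hhead

-- the compressed loop in terms of the depth profile and pvSegs
theorem pvLoopC_staged (cs : List Char) : ∀ (all : List Char) (i d start : Int)
    (cont : List (List Char)), 0 ≤ d →
    pvLoopC cs all i d start cont =
      if (pvDepths cs d).any (fun x => x < 0) then none
      else some (cont ++ (pvSegs cs i d start).map
        (fun p => PySem.List.slice all (some p.1) (some p.2))) := by
  induction cs with
  | nil => intro all i d start cont _; simp [pvLoopC, pvDepths, pvSegs]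
  | cons c rest ih =>
    intro all i d start cont hd
    by_cases hop : c = '('
    · have hne : c ≠ ')' := by rw [hop]; decide
      simp only [pvLoopC, pvDepths, pvSegs, if_pos hop, if_neg hne]
      have e : d + 1 - 0 = d + 1 := by ring
      rw [e, ih all (i+1) (d+1) _ cont (by omega)]
      have hfalse : decide (d + 1 < 0) = false := by simp; omega
      simp only [List.any_cons, hfalse, Bool.false_or]
    · by_cases hcl : c = ')'
      · simp only [pvLoopC, pvDepths, pvSegs, if_neg hop, if_pos hcl]
        by_cases h0 : d = 0
        · have : decide (d + 0 - 1 < 0) = true := by simp; omega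
          simp only [List.any_cons, this, Bool.true_or, if_pos h0]
          simp
        · simp only [if_neg h0]
          have e : d + 0 - 1 = d - 1 := by ring
          rw [e, ih all (i+1) (d-1) start _ (by omega)]
          have hfalse : decide (d - 1 < 0) = false := by simp; omega
          simp only [List.any_cons, hfalse, Bool.false_or]
          by_cases h1 : d = 1
          · have e1 : d - 1 = 0 := by omega
            simp [h1]
          · have e1 : d - 1 ≠ 0 := by omega
            simp [e1, h1]
      · simp only [pvLoopC, pvDepths, pvSegs, if_neg hop, if_neg hcl]
        have e : d + 0 - 0 = d := by ring
        rw [e, ih all (i+1) d start cont hd]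
        have hfalse : decide (d < 0) = false := by simp; omega
        simp only [List.any_cons, hfalse, Bool.false_or]

-- zipping the two boundary comprehensions gives exactly the segment list
theorem zip_segs (cs : List Char) : ∀ (i d start : Int), 0 ≤ d →
    (pvDepths cs d).any (fun x => x < 0) = false →
    ((if d = 0 then [] else [start]) ++ pvStarts cs (pvDepths cs d) i).zip
        (pvEnds cs (pvDepths cs d) i) = pvSegs cs i d start := by
  induction cs with
  | nil => intro i d start _ _; simp [pvStarts, pvEnds, pvSegs]
  | cons c rest ih =>
    intro i d start hd hnn
    by_cases hop : c = '('
    · have hne : c ≠ ')' := by rw [hop]; decide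
      simp only [pvDepths, pvStarts, pvEnds, pvSegs, if_pos hop, if_neg hne] at hnn ⊢
      have e : d + 1 - 0 = d + 1 := by ring
      rw [e] at hnn ⊢
      simp only [List.any_cons, Bool.or_eq_false_iff] at hnn
      by_cases h0 : d = 0
      · have h1 : d + 1 = 1 := by omega
        have h1' : d + 1 ≠ 0 := by omega
        simp only [if_pos h0, if_pos (And.intro hop h1),
          if_neg (by simp [hop] : ¬ (c = ')' ∧ d + 1 = 0)), List.nil_append]
        have := ih (i+1) (d+1) (i+1) (by omega) hnn.2
        simp only [if_neg h1'] at this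
        simpa [h0] using this
      · have h1 : d + 1 ≠ 1 := by omega
        have h1' : d + 1 ≠ 0 := by omega
        simp only [if_neg h0,
          if_neg (by simp [h1] : ¬ (c = '(' ∧ d + 1 = 1)),
          if_neg (by simp [hop] : ¬ (c = ')' ∧ d + 1 = 0)), List.nil_append]
        have := ih (i+1) (d+1) start (by omega) hnn.2
        simp only [if_neg h1'] at this
        simpa using this
    · by_cases hcl : c = ')'
      · simp only [pvDepths, pvStarts, pvEnds, pvSegs, if_neg hop, if_pos hcl] at hnn ⊢
        have e : d + 0 - 1 = d - 1 := by ring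
        rw [e] at hnn ⊢
        simp only [List.any_cons, Bool.or_eq_false_iff] at hnn
        have h0 : d ≠ 0 := by
          intro h; rw [h] at hnn; simp at hnn
        simp only [if_neg h0]
        by_cases h1 : d = 1
        · have he : d - 1 = 0 := by omega
          rw [he] at hnn ⊢
          have := ih (i+1) 0 start le_rfl hnn.2
          simp at this
          simp [hcl, h1]
          exact this
        · have he : d - 1 ≠ 0 := by omega
          simp only [if_neg (by simp [hcl] : ¬ (c = '(' ∧ d - 1 = 1)),
            if_neg (by simp [he] : ¬ (c = ')' ∧ d - 1 = 0)), List.nil_append]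
          have := ih (i+1) (d-1) start (by omega) hnn.2
          simp only [if_neg he] at this
          simpa [h1] using this
      · simp only [pvDepths, pvStarts, pvEnds, pvSegs, if_neg hop, if_neg hcl] at hnn ⊢
        have e : d + 0 - 0 = d := by ring
        rw [e] at hnn ⊢
        simp only [List.any_cons, Bool.or_eq_false_iff] at hnn
        simp only [if_neg (by simp [hop] : ¬ (c = '(' ∧ d = 1)),
          if_neg (by simp [hcl] : ¬ (c = ')' ∧ d = 0)), List.nil_append]
        exact ih (i+1) d start hd hnn.2

-- Pre_'s prefix-count condition means the depth profile never goes negative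
theorem depths_nonneg (cs : List Char) : ∀ (d : Int), 0 ≤ d →
    (∀ n ≤ cs.length, ((cs.take n).count ')' : Int) ≤ d + (cs.take n).count '(') →
    (pvDepths cs d).any (fun x => x < 0) = false := by
  induction cs with
  | nil => intro d _ _; simp [pvDepths]
  | cons c rest ih =>
    intro d hd h
    by_cases hop : c = '('
    · have hne : c ≠ ')' := by rw [hop]; decide
      simp only [pvDepths, if_pos hop, if_neg hne, List.any_cons, Bool.or_eq_false_iff]
      constructor
      · simp; omega
      · apply ih _ (by omega : (0:Int) ≤ d + 1 - 0)
        intro n hn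
        have h2 := h (n+1) (by simpa using Nat.succ_le_succ hn)
        simp [hop] at h2
        omega
    · by_cases hcl : c = ')'
      · have h1 := h 1 (by simp)
        simp [hcl] at h1
        simp only [pvDepths, if_neg hop, if_pos hcl, List.any_cons, Bool.or_eq_false_iff]
        constructor
        · simp; omega
        · apply ih _ (by omega : (0:Int) ≤ d + 0 - 1)
          intro n hn
          have h2 := h (n+1) (by simpa using Nat.succ_le_succ hn)
          simp [hcl] at h2
          omega
      · simp only [pvDepths, if_neg hop, if_neg hcl, List.any_cons, Bool.or_eq_false_iff]
        constructor
        · simp; omega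
        · apply ih _ (by omega : (0:Int) ≤ d + 0 - 0)
          intro n hn
          have h2 := h (n+1) (by simpa using Nat.succ_le_succ hn)
          simp [hop, hcl] at h2
          omega

-- ===== VERDICT (by name: the statement is the Claim_ definition above) =====
theorem parent_printC_spec : Claim_equal_parent_printC := by
  intro string _ hpre
  unfold Spec_parent_printC parent_printC parent_printC_alt
  by_cases h : '(' ∈ string.toList ∧ ')' ∈ string.toList
  · simp only [if_pos h]
    have hnn : (pvDepths string.toList 0).any (fun x => x < 0) = false := by
      apply depths_nonneg _ 0 le_rfl
      intro n hn
      have := hpre h n hn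
      simpa using this
    rw [pvLoop_eq string.toList string.toList 0 [] [] 0 0 (by simp) (by simp),
        pvLoopC_staged string.toList string.toList 0 0 0 [] le_rfl, hnn]
    have hz := zip_segs string.toList 0 0 0 le_rfl hnn
    simp [← hz]
  · simp [h]
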